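-- pv_equiv track=rewrite | github.com/owenluo125/CodeWars | March 2023/[7] Ch4113ng3.py | nerdify
-- ===== SOURCE A (Python) =====
-- def nerdify(txt):
--     dict = {"a":"4",
--            "e": "3",
--            "l": "1"}
--     for x in range(len(txt)):
--         if txt[x].lower() in dict and txt[x] != "L":
--             txt = txt[:x] + dict[txt[x].lower()] + txt[x+1:]
--     return txt
-- ===== SOURCE B (Python) =====
-- def nerdify(txt):
--     return (txt.replace("a", "4")
--                .replace("A", "4")
--                .replace("e", "3")
--                .replace("E", "3")
--                .replace("l", "1"))
-- ===== Notes on version B (the rewrite author's own statement) =====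
-- stated objective: idiomatic
-- what changed: Replaces A's index loop that rebuilds the string by slicing at every hit with a chain of whole-string str.replace passes (one per target character, both cases of a/e, lowercase l only); no produced character is itself a key, so the passes cannot cascade.
import Mathlib
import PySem

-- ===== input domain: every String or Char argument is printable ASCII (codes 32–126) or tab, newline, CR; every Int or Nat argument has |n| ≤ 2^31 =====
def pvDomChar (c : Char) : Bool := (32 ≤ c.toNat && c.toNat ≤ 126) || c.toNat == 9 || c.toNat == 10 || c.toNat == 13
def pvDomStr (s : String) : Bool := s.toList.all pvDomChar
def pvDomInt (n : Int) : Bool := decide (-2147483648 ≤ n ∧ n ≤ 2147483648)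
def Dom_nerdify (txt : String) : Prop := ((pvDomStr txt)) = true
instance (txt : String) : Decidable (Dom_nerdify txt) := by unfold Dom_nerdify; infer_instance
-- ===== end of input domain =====

-- B is a chain of whole-string replace passes instead of A's index loop rebuilding by slices at each hit.

-- ===== PORT A =====
def nerdDictA : PySem.Dict String String :=
  ((PySem.Dict.empty.insert "a" "4").insert "e" "3").insert "l" "1"

def nerdStepA (t : String) (x : Int) : String :=
  match PySem.Str.pyGet? t x with
  | none => t
  | some c =>
    match PySem.Dict.get? nerdDictA (PySem.Str.lower (String.ofList [c])) with
    | some r =>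
      if String.ofList [c] ≠ "L" then
        PySem.Str.slice t none (some x) ++ r ++ PySem.Str.slice t (some (x + 1)) none
      else t
    | none => t

def nerdify (txt : String) : String :=
  (PySem.List.pyRange 0 (PySem.Str.len txt) 1).foldl nerdStepA txt

-- ===== PORT B =====
def nerdify_alt (txt : String) : String :=
  PySem.Str.replace (PySem.Str.replace (PySem.Str.replace (PySem.Str.replace
    (PySem.Str.replace txt "a" "4") "A" "4") "e" "3") "E" "3") "l" "1"

-- ===== PRECONDITION & SPEC =====
def Spec_nerdify (txt : String) (out : String) : Prop := out = nerdify_alt txt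
instance (txt : String) (out : String) : Decidable (Spec_nerdify txt out) := by unfold Spec_nerdify; infer_instance

-- ===== CLAIM (what is proved, stated in full; the proofs are below) =====
def Claim_equal_nerdify : Prop := ∀ (txt : String), Dom_nerdify txt → Spec_nerdify txt (nerdify txt)

-- ===== LEMMAS AND PROOFS =====

-- the common per-character translation both programs compute
def leet (c : Char) : Char :=
  if c = 'a' ∨ c = 'A' then '4' else if c = 'e' ∨ c = 'E' then '3' else
  if c = 'l' then '1' else c

theorem replace_go_single (a b : Char) :
    ∀ (fuel : Nat) (l acc : List Char), l.length ≤ fuel →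
      PySem.Chars.replace.go [a] [b] fuel l acc =
        acc.reverse ++ l.map (fun c => if c = a then b else c) := by
  intro fuel
  induction fuel with
  | zero =>
    intro l acc h
    have : l = [] := List.eq_nil_of_length_eq_zero (Nat.le_zero.mp h)
    subst this; simp [PySem.Chars.replace.go]
  | succ n ih =>
    intro l acc h
    cases l with
    | nil => simp [PySem.Chars.replace.go]
    | cons c t =>
      have ht : t.length ≤ n := by simpa using Nat.le_of_succ_le_succ h
      by_cases hc : c = a
      · subst hc
        simp [PySem.Chars.replace.go, List.isPrefixOf, ih _ _ ht]
      · simp [PySem.Chars.replace.go, List.isPrefixOf, Ne.symm hc, hc, ih _ _ ht]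

theorem replace_single (a b : Char) (cs : List Char) :
    PySem.Chars.replace cs [a] [b] = cs.map (fun c => if c = a then b else c) := by
  rw [PySem.Chars.replace, if_neg (by simp)]
  exact replace_go_single a b cs.length cs [] (le_refl _)

theorem alt_toList (txt : String) : (nerdify_alt txt).toList = txt.toList.map leet := by
  simp only [nerdify_alt, PySem.Str.toList_replace,
    show ("a" : String).toList = ['a'] from rfl, show ("4" : String).toList = ['4'] from rfl,
    show ("A" : String).toList = ['A'] from rfl, show ("e" : String).toList = ['e'] from rfl,
    show ("3" : String).toList = ['3'] from rfl, show ("E" : String).toList = ['E'] from rfl,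
    show ("l" : String).toList = ['l'] from rfl, show ("1" : String).toList = ['1'] from rfl,
    replace_single, List.map_map]
  apply List.map_congr_left
  intro c _
  simp only [Function.comp_apply]
  unfold leet
  split_ifs <;> simp_all

theorem char_eq_iff_toNat (a b : Char) : a = b ↔ a.toNat = b.toNat := by
  rw [Char.ext_iff]
  exact ⟨fun h => congrArg UInt32.toNat h, fun h => UInt32.toNat_inj.mp h⟩

theorem lowerChar_eq_iff (c : Char) (k : Char) (hk : 97 ≤ k.toNat ∧ k.toNat ≤ 122) :
    PySem.Chars.lowerChar c = k ↔ (c = k ∨ c.toNat = k.toNat - 32) := by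
  unfold PySem.Chars.lowerChar PySem.Chars.isupper
  by_cases hu : ('A' ≤ c ∧ c ≤ 'Z')
  · have hrange : 65 ≤ c.toNat ∧ c.toNat ≤ 90 := by
      obtain ⟨h1, h2⟩ := hu
      rw [Char.le_def, UInt32.le_iff_toNat_le] at h1 h2
      exact ⟨h1, h2⟩
    rw [if_pos (by simp [hu.1, hu.2])]
    have hv : (Char.ofNat (c.toNat + 32)).toNat = c.toNat + 32 := by
      rw [Char.toNat_ofNat, if_pos]
      exact Or.inl (by omega)
    rw [char_eq_iff_toNat (Char.ofNat (c.toNat + 32)) k, char_eq_iff_toNat c k, hv]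
    omega
  · have hrange : ¬(65 ≤ c.toNat ∧ c.toNat ≤ 90) := by
      intro h
      exact hu ⟨by rw [Char.le_def, UInt32.le_iff_toNat_le]; exact h.1,
                by rw [Char.le_def, UInt32.le_iff_toNat_le]; exact h.2⟩
    rw [if_neg (by by_contra h; simp at h; exact hu ⟨h.1, h.2⟩)]
    rw [char_eq_iff_toNat c k]
    omega

theorem ofList_single_ne (x k : Char) (h : x ≠ k) :
    (String.ofList [k] == String.ofList [x]) = false := by
  rw [beq_eq_false_iff_ne]
  intro hc
  exact h (by simpa using (congrArg String.toList hc).symm)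

theorem dict_none (x : Char) (h1 : x ≠ 'a') (h2 : x ≠ 'e') (h3 : x ≠ 'l') :
    PySem.Dict.get? nerdDictA (String.ofList [x]) = none := by
  have hitems : nerdDictA.items = [("a","4"),("e","3"),("l","1")] := by decide
  simp [PySem.Dict.get?, hitems, List.find?]
  rw [show ("a" : String) = String.ofList ['a'] from rfl, ofList_single_ne x 'a' h1,
      show ("e" : String) = String.ofList ['e'] from rfl, ofList_single_ne x 'e' h2,
      show ("l" : String) = String.ofList ['l'] from rfl, ofList_single_ne x 'l' h3]

theorem get?_key (c : Char) :
    PySem.Dict.get? nerdDictA (PySem.Str.lower (String.ofList [c])) =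
      if c = 'a' ∨ c = 'A' then some "4" else if c = 'e' ∨ c = 'E' then some "3"
      else if c = 'l' ∨ c = 'L' then some "1" else none := by
  have hkey : PySem.Str.lower (String.ofList [c]) = String.ofList [PySem.Chars.lowerChar c] := by
    conv_lhs => rw [← String.ofList_toList (s := PySem.Str.lower (String.ofList [c]))]
    rw [PySem.Str.toList_lower]
    simp [PySem.Chars.lower]
  rw [hkey]
  by_cases h1 : c = 'a' ∨ c = 'A'
  · rw [if_pos h1]
    have hl : PySem.Chars.lowerChar c = 'a' := by
      rw [lowerChar_eq_iff c 'a' (by decide)]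
      rcases h1 with rfl | rfl
      · exact Or.inl rfl
      · exact Or.inr rfl
    rw [hl]; decide
  · rw [if_neg h1]
    by_cases h2 : c = 'e' ∨ c = 'E'
    · rw [if_pos h2]
      have hl : PySem.Chars.lowerChar c = 'e' := by
        rw [lowerChar_eq_iff c 'e' (by decide)]
        rcases h2 with rfl | rfl
        · exact Or.inl rfl
        · exact Or.inr rfl
      rw [hl]; decide
    · rw [if_neg h2]
      by_cases h3 : c = 'l' ∨ c = 'L'
      · rw [if_pos h3]
        have hl : PySem.Chars.lowerChar c = 'l' := by
          rw [lowerChar_eq_iff c 'l' (by decide)]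
          rcases h3 with rfl | rfl
          · exact Or.inl rfl
          · exact Or.inr rfl
        rw [hl]; decide
      · rw [if_neg h3]
        push Not at h1 h2 h3
        apply dict_none
        · intro hl
          rcases (lowerChar_eq_iff c 'a' (by decide)).mp hl with h | h
          · exact h1.1 h
          · exact h1.2 ((char_eq_iff_toNat c 'A').mpr (by rw [h]; rfl))
        · intro hl
          rcases (lowerChar_eq_iff c 'e' (by decide)).mp hl with h | h
          · exact h2.1 h
          · exact h2.2 ((char_eq_iff_toNat c 'E').mpr (by rw [h]; rfl))
        · intro hl
          rcases (lowerChar_eq_iff c 'l' (by decide)).mp hl with h | h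
          · exact h3.1 h
          · exact h3.2 ((char_eq_iff_toNat c 'L').mpr (by rw [h]; rfl))

theorem toList_inj (s t : String) (h : s.toList = t.toList) : s = t := by
  rw [← String.ofList_toList (s := s), ← String.ofList_toList (s := t), h]

theorem stepA_char (pre suf : List Char) (c : Char) :
    nerdStepA (String.ofList (pre ++ c :: suf)) ((pre.length : Nat) : Int) =
      String.ofList (pre ++ leet c :: suf) := by
  unfold nerdStepA
  have hget : PySem.Str.pyGet? (String.ofList (pre ++ c :: suf)) ((pre.length : Nat) : Int) = some c := by
    rw [PySem.Str.pyGet?_natCast]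
    simp
  rw [hget]
  dsimp only
  rw [get?_key]
  have happ : ∀ r : Char,
      PySem.Str.slice (String.ofList (pre ++ c :: suf)) none (some ((pre.length : Nat) : Int)) ++
        String.ofList [r] ++
        PySem.Str.slice (String.ofList (pre ++ c :: suf)) (some (((pre.length : Nat) : Int) + 1)) none =
      String.ofList (pre ++ r :: suf) := by
    intro r
    apply toList_inj
    rw [String.toList_append, String.toList_append, PySem.Str.toList_slice, PySem.Str.toList_slice]
    simp only [PySem.Chars.slice_eq_listSlice, String.toList_ofList]
    rw [PySem.List.slice_to_natCast,
        show ((pre.length : Nat) : Int) + 1 = (((pre.length + 1 : Nat)) : Int) by push_cast; ring,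
        PySem.List.slice_from_natCast]
    rw [show pre ++ c :: suf = (pre ++ [c]) ++ suf by simp]
    rw [show pre.length + 1 = (pre ++ [c]).length by simp, List.drop_left]
    simp
  by_cases h1 : c = 'a' ∨ c = 'A'
  · rw [if_pos h1]
    have hne : String.ofList [c] ≠ "L" := by
      intro h
      have : c = 'L' := by simpa using congrArg String.toList h
      rcases h1 with rfl | rfl <;> simp at this
    simp only [if_pos hne]
    rw [show ("4" : String) = String.ofList ['4'] from rfl]
    rw [happ '4']
    rcases h1 with rfl | rfl <;> rfl
  · rw [if_neg h1]
    by_cases h2 : c = 'e' ∨ c = 'E'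
    · rw [if_pos h2]
      have hne : String.ofList [c] ≠ "L" := by
        intro h
        have : c = 'L' := by simpa using congrArg String.toList h
        rcases h2 with rfl | rfl <;> simp at this
      simp only [if_pos hne]
      rw [show ("3" : String) = String.ofList ['3'] from rfl]
      rw [happ '3']
      rcases h2 with rfl | rfl <;> rfl
    · rw [if_neg h2]
      by_cases h3 : c = 'l' ∨ c = 'L'
      · rw [if_pos h3]
        rcases h3 with rfl | rfl
        · have hne : String.ofList ['l'] ≠ "L" := by decide
          simp only [if_pos hne]
          rw [show ("1" : String) = String.ofList ['1'] from rfl]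
          rw [happ '1']
          rfl
        · have hne : ¬(String.ofList ['L'] ≠ "L") := by decide
          simp only [if_neg hne]
          rfl
      · rw [if_neg h3]
        have hc : leet c = c := by
          unfold leet
          rw [if_neg h1, if_neg h2, if_neg (fun h => h3 (Or.inl h))]
        rw [hc]

theorem loopA (cs : List Char) : ∀ k : Nat, k ≤ cs.length →
    (PySem.List.pyRange 0 (k : Int) 1).foldl nerdStepA (String.ofList cs) =
      String.ofList ((cs.take k).map leet ++ cs.drop k) := by
  intro k
  induction k with
  | zero => intro _; simp [PySem.List.pyRange]
  | succ n ih =>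
    intro h
    rw [show ((n + 1 : Nat) : Int) = (n : Int) + 1 by push_cast; ring,
        PySem.List.pyRange_one_succ_right (by positivity), List.foldl_append,
        ih (by omega), List.foldl_cons, List.foldl_nil]
    have hn : n < cs.length := by omega
    have hdrop : cs.drop n = cs[n] :: cs.drop (n + 1) := List.drop_eq_getElem_cons hn
    rw [hdrop]
    have hlen : ((cs.take n).map leet).length = n := by
      simp [List.length_take, Nat.min_eq_left (le_of_lt hn)]
    rw [show (n : Int) = ((((cs.take n).map leet).length : Nat) : Int) by rw [hlen]]
    rw [stepA_char]
    congr 1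
    rw [List.take_succ_eq_append_getElem hn, List.map_append]
    simp

theorem a_eq_map (txt : String) : nerdify txt = String.ofList (txt.toList.map leet) := by
  unfold nerdify
  have hlen : PySem.Str.len txt = ((txt.toList.length : Nat) : Int) := by
    simp [PySem.Str.len_eq]
  rw [hlen]
  have hloop := loopA txt.toList txt.toList.length (le_refl _)
  rw [String.ofList_toList] at hloop
  rw [hloop]
  apply toList_inj
  simp [- String.length_toList]

theorem nerdify_spec : Claim_equal_nerdify := by
  intro txt _
  unfold Spec_nerdify
  rw [a_eq_map]
  apply toList_inj
  rw [alt_toList, String.toList_ofList]
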